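-- pv_equiv track=rewrite | github.com/wldevries/hive-zero | tests/test_zertz_symmetry.py | _hex_to_index
-- ===== SOURCE A (Python) =====
-- def _hex_to_index(q: int, r: int) -> int:
--     """Compute hex_to_index(q, r) in Python, matching the Rust implementation."""
--     RADIUS = 3
--     idx = 0
--     row = -RADIUS
--     while row < r:
--         q_min = max(-RADIUS, -RADIUS - row)
--         q_max = min(RADIUS, RADIUS - row)
--         idx += q_max - q_min + 1
--         row += 1
--     q_min = max(-RADIUS, -RADIUS - r)
--     return idx + (q - q_min)
-- ===== SOURCE B (Python) =====
-- def _hex_to_index(q: int, r: int) -> int: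
--     """Closed-form index: sum the row widths 7-|row| over [-RADIUS, r-1] arithmetically."""
--     RADIUS = 3
--     if r <= -RADIUS:
--         s = 0
--     elif r <= 1:
--         s = (r + 10) * (r + 3) // 2
--     else:
--         s = 22 + (14 - r) * (r - 1) // 2
--     return s + q - max(-RADIUS, -RADIUS - r)
-- ===== Notes on version B (the rewrite author's own statement) =====
-- stated objective: faster
-- what changed: Replaced the per-row accumulation while-loop with a closed-form arithmetic-series sum of the row widths, split at row 0.
import Mathlib
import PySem

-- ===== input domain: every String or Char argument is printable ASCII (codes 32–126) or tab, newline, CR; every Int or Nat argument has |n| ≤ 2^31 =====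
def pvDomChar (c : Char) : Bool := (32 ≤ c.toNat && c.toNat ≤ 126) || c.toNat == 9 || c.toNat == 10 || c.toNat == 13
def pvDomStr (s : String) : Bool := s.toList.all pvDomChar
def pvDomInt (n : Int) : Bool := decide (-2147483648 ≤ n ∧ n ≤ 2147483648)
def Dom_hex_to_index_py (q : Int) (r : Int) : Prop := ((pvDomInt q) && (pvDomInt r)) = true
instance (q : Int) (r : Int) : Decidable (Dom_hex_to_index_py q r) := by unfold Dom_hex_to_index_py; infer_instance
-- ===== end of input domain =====

-- B replaces A's row-by-row accumulation loop with a closed-form arithmetic-series sum of the row widths (simpler, constant-time).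

-- ===== PORT A =====
-- the while loop of A: state (idx, row), one iteration per row < r
def hexA_go (r : Int) (idx : Int) (row : Int) : Int :=
  if row < r then
    hexA_go r (idx + (min 3 (3 - row) - max (-3) (-3 - row) + 1)) (row + 1)
  else idx
termination_by (r - row).toNat
decreasing_by omega

def hex_to_index_py (q : Int) (r : Int) : Int :=
  hexA_go r 0 (-3) + (q - max (-3) (-3 - r))

-- ===== PORT B =====
-- closed-form prefix sum of the row widths over [-RADIUS, r-1]
def hexB_s (r : Int) : Int :=
  if r ≤ -3 then 0
  else if r ≤ 1 then PySem.Int.floordiv ((r + 10) * (r + 3)) 2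
  else 22 + PySem.Int.floordiv ((14 - r) * (r - 1)) 2

def hex_to_index_py_alt (q : Int) (r : Int) : Int :=
  hexB_s r + q - max (-3) (-3 - r)

-- ===== PRECONDITION & SPEC =====
def Spec_hex_to_index_py (q : Int) (r : Int) (out : Int) : Prop := out = hex_to_index_py_alt q r
instance (q : Int) (r : Int) (out : Int) : Decidable (Spec_hex_to_index_py q r out) := by unfold Spec_hex_to_index_py; infer_instance

-- ===== CLAIM (what is proved, stated in full; the proofs are below) =====
def Claim_equal_hex_to_index_py : Prop := ∀ (q : Int) (r : Int), Dom_hex_to_index_py q r → Spec_hex_to_index_py q r (hex_to_index_py q r)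

-- ===== LEMMAS AND PROOFS =====

-- exact halving of an even integer under Python floor division
lemma half_exact (p : Int) (h : Even p) : 2 * PySem.Int.floordiv p 2 = p := by
  obtain ⟨k, hk⟩ := h
  subst hk
  have hkk : k + k = 2 * k := by ring
  rw [hkk, PySem.Int.floordiv_eq_ediv_of_pos (by norm_num),
    Int.mul_ediv_cancel_left k (by norm_num)]

lemma hexA_go_stop (r idx row : Int) (h : ¬ row < r) : hexA_go r idx row = idx := by
  rw [hexA_go, if_neg h]

lemma hexA_go_step (r idx row : Int) (h : row < r) :
    hexA_go r idx row
      = hexA_go r (idx + (min 3 (3 - row) - max (-3) (-3 - row) + 1)) (row + 1) := by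
  conv_lhs => rw [hexA_go]
  rw [if_pos h]

-- peeling the LAST iteration off A's loop
lemma go_succ : ∀ (n : Nat) (idx row r : Int), (r - row).toNat = n → row ≤ r →
    hexA_go (r + 1) idx row
      = hexA_go r idx row + (min 3 (3 - r) - max (-3) (-3 - r) + 1) := by
  intro n
  induction n with
  | zero =>
    intro idx row r hn hle
    have hrow : row = r := by omega
    subst hrow
    rw [hexA_go_step _ _ _ (by omega), hexA_go_stop _ _ _ (by omega),
      hexA_go_stop _ _ _ (by omega)]
  | succ n ih =>
    intro idx row r hn hle
    have hlt : row < r := by omega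
    rw [hexA_go_step (r + 1) _ _ (by omega), hexA_go_step r _ _ hlt]
    exact ih _ (row + 1) r (by omega) (by omega)

lemma go_S_ge (r : Int) (hr : -3 ≤ r) : hexA_go r 0 (-3) = hexB_s r := by
  induction r, hr using Int.le_induction with
  | base => rw [hexA_go_stop _ _ _ (by omega)]; decide
  | succ r hr ih =>
    rw [go_succ (r - (-3)).toNat 0 (-3) r rfl (by omega), ih]
    by_cases hm3 : r = -3
    · subst hm3; decide
    by_cases he1 : r = 1
    · subst he1; decide
    by_cases hlow : r ≤ 0
    · -- both sides in the middle branch, -2 ≤ r ≤ 0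
      have e1 : Even ((r + 10) * (r + 3)) := by
        rw [Int.even_mul, Int.even_iff, Int.even_iff]; omega
      have e2 : Even ((r + 1 + 10) * (r + 1 + 3)) := by
        rw [Int.even_mul, Int.even_iff, Int.even_iff]; omega
      have k1 := half_exact _ e1
      have k2 := half_exact _ e2
      have hd : (r + 1 + 10) * (r + 1 + 3) = (r + 10) * (r + 3) + (2 * r + 14) := by ring
      have hmin : min 3 (3 - r) = 3 := by omega
      have hmax : max (-3 : Int) (-3 - r) = -3 - r := by omega
      simp only [hexB_s, if_neg (show ¬ r ≤ -3 by omega), if_pos (show r ≤ 1 by omega),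
        if_neg (show ¬ r + 1 ≤ -3 by omega), if_pos (show r + 1 ≤ 1 by omega),
        hmin, hmax]
      linarith
    · -- both sides in the last branch, 2 ≤ r
      have h2 : 2 ≤ r := by omega
      have e1 : Even ((14 - r) * (r - 1)) := by
        rw [Int.even_mul, Int.even_iff, Int.even_iff]; omega
      have e2 : Even ((14 - (r + 1)) * (r + 1 - 1)) := by
        rw [Int.even_mul, Int.even_iff, Int.even_iff]; omega
      have k1 := half_exact _ e1
      have k2 := half_exact _ e2
      have hd : (14 - (r + 1)) * (r + 1 - 1) = (14 - r) * (r - 1) + (14 - 2 * r) := by ring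
      have hmin : min 3 (3 - r) = 3 - r := by omega
      have hmax : max (-3 : Int) (-3 - r) = -3 := by omega
      simp only [hexB_s, if_neg (show ¬ r ≤ -3 by omega), if_neg (show ¬ r ≤ 1 by omega),
        if_neg (show ¬ r + 1 ≤ -3 by omega), if_neg (show ¬ r + 1 ≤ 1 by omega),
        hmin, hmax]
      linarith

lemma go_S (r : Int) : hexA_go r 0 (-3) = hexB_s r := by
  by_cases h : r ≤ -3
  · rw [hexA_go_stop _ _ _ (by omega), hexB_s, if_pos h]
  · exact go_S_ge r (by omega)

-- ===== VERDICT (by name: the statement is the Claim_ definition above) =====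
theorem hex_to_index_py_spec : Claim_equal_hex_to_index_py := by
  intro q r _
  unfold Spec_hex_to_index_py hex_to_index_py hex_to_index_py_alt
  rw [go_S]
  ring
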